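-- pv_equiv track=rewrite | github.com/FiodorGrecu/Exercises | algorithms/graph_traversal/2_most_neighbors/solution/solution.py | most_neighbours
-- ===== SOURCE A (Python) =====
-- def most_neighbours(adjacency_list):
--     max_len = -1
--     max_key = -1
--     for keyNode, edge_lst in adjacency_list.items():
--         num_neighbors = len(edge_lst)
--         if num_neighbors > max_len:
--             max_key = keyNode
--             max_len = num_neighbors
--         elif num_neighbors == max_len and keyNode < max_key:
--             max_key = keyNode
--     return max_key
-- ===== SOURCE B (Python) =====
-- def most_neighbours(adjacency_list):
--     items = sorted(adjacency_list.items(), key=lambda kv: (-len(kv[1]), kv[0]))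
--     return items[0][0] if items else -1
-- ===== Notes on version B (the rewrite author's own statement) =====
-- stated objective: alternative
-- what changed: Replaces A's running-max loop with explicit tie-break branches by a stable sort of the items under key (-len(edges), node_key) and picking the first entry (−1 for an empty dict).
import Mathlib
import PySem

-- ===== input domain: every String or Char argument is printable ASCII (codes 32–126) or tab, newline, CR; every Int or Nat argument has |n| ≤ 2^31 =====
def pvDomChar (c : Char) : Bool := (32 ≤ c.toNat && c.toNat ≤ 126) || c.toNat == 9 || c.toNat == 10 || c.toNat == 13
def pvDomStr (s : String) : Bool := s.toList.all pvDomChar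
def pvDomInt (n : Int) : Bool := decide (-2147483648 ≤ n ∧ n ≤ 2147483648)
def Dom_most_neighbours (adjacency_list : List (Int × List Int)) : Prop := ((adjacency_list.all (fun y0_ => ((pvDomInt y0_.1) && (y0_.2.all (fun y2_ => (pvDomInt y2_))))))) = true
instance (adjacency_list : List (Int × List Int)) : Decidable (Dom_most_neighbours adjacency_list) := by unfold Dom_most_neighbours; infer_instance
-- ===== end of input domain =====

-- B sorts the items by (-neighbour-count, key) and returns the first key; same value as A's running-max scan, including -1 on the empty dict.

-- ===== PORT A =====
def most_neighbours (adjacency_list : List (Int × List Int)) : Int :=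
  (adjacency_list.foldl
    (fun (st : Int × Int) kv =>
      let num_neighbors : Int := kv.2.length
      if num_neighbors > st.1 then (num_neighbors, kv.1)
      else if num_neighbors = st.1 ∧ kv.1 < st.2 then (st.1, kv.1)
      else st)
    (-1, -1)).2

-- ===== PORT B =====
def most_neighbours_alt (adjacency_list : List (Int × List Int)) : Int :=
  let items := PySem.List.sorted2 adjacency_list
    (fun kv => -(kv.2.length : Int)) (fun kv => kv.1)
  match items with
  | [] => -1
  | h :: _ => h.1

-- ===== PRECONDITION & SPEC =====
def Spec_most_neighbours (adjacency_list : List (Int × List Int)) (out : Int) : Prop := out = most_neighbours_alt adjacency_list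
instance (adjacency_list : List (Int × List Int)) (out : Int) : Decidable (Spec_most_neighbours adjacency_list out) := by unfold Spec_most_neighbours; infer_instance

-- ===== CLAIM (what is proved, stated in full; the proofs are below) =====
def Claim_equal_most_neighbours : Prop := ∀ (adjacency_list : List (Int × List Int)), Dom_most_neighbours adjacency_list → Spec_most_neighbours adjacency_list (most_neighbours adjacency_list)

-- ===== LEMMAS AND PROOFS =====

-- the comparison sorted2 uses on the tuple key (-len, key)
def pvBefore (a b : Int × List Int) : Bool :=
  decide ((-(a.2.length : Int)) < (-(b.2.length : Int))) ||
    (!decide ((-(b.2.length : Int)) < (-(a.2.length : Int))) && decide (a.1 < b.1))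

def pvState (kv : Int × List Int) : Int × Int := ((kv.2.length : Int), kv.1)

theorem pv_sorted2_eq (l : List (Int × List Int)) :
    PySem.List.sorted2 l (fun kv => -(kv.2.length : Int)) (fun kv => kv.1)
      = l.foldl (fun acc x => PySem.List.insertBy pvBefore x acc) [] := rfl

theorem pv_head_insertBy {α : Type} (before : α → α → Bool) (x a : α) (as : List α) :
    (PySem.List.insertBy before x (a :: as)).head? = some (if before x a then x else a) := by
  simp only [PySem.List.insertBy]
  split_ifs <;> simp

theorem pv_head_foldl_insertBy {α : Type} (before : α → α → Bool) :
    ∀ (xs acc : List α) (h : α), acc.head? = some h →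
      (xs.foldl (fun acc x => PySem.List.insertBy before x acc) acc).head?
        = some (xs.foldl (fun c x => if before x c then x else c) h) := by
  intro xs
  induction xs with
  | nil => intro acc h hh; simpa using hh
  | cons x xs ih =>
    intro acc h hh
    cases acc with
    | nil => simp at hh
    | cons a as =>
      simp only [List.head?, Option.some.injEq] at hh
      subst hh
      simp only [List.foldl]
      cases e : PySem.List.insertBy before x (a :: as) with
      | nil => have := pv_head_insertBy before x a as; rw [e] at this; simp at this
      | cons b bs =>
        have hb : b = (if before x a then x else a) := by
          have := pv_head_insertBy before x a as; rw [e] at this; simpa using this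
        subst hb
        exact ih _ _ rfl

theorem pv_stepA_state (h x : Int × List Int) :
    (if ((x.2.length : Int)) > (pvState h).1 then ((x.2.length : Int), x.1)
      else if ((x.2.length : Int)) = (pvState h).1 ∧ x.1 < (pvState h).2 then ((pvState h).1, x.1)
      else pvState h)
    = pvState (if pvBefore x h then x else h) := by
  simp only [pvState, pvBefore, gt_iff_lt, Bool.or_eq_true, Bool.and_eq_true,
    Bool.not_eq_true', decide_eq_true_eq, decide_eq_false_iff_not]
  split_ifs <;> simp only [Prod.mk.injEq, and_true] <;> omega

theorem pv_foldA (rest : List (Int × List Int)) :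
    ∀ (x0 : Int × List Int),
      rest.foldl
        (fun (st : Int × Int) kv =>
          if ((kv.2.length : Int)) > st.1 then ((kv.2.length : Int), kv.1)
          else if ((kv.2.length : Int)) = st.1 ∧ kv.1 < st.2 then (st.1, kv.1)
          else st)
        (pvState x0)
      = pvState (rest.foldl (fun c x => if pvBefore x c then x else c) x0) := by
  induction rest with
  | nil => intro x0; rfl
  | cons x xs ih =>
    intro x0
    simp only [List.foldl]
    rw [pv_stepA_state x0 x, ih]

-- ===== VERDICT (by name: the statement is the Claim_ definition above) =====
theorem most_neighbours_spec : Claim_equal_most_neighbours := by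
  intro l _
  unfold Spec_most_neighbours most_neighbours most_neighbours_alt
  dsimp only
  cases l with
  | nil => rfl
  | cons x rest =>
    rw [pv_sorted2_eq]
    simp only [List.foldl]
    have hfirst :
        (if ((x.2.length : Int)) > ((-1 : Int), (-1 : Int)).1 then ((x.2.length : Int), x.1)
          else if ((x.2.length : Int)) = ((-1 : Int), (-1 : Int)).1 ∧ x.1 < ((-1 : Int), (-1 : Int)).2
            then (((-1 : Int), (-1 : Int)).1, x.1)
          else ((-1 : Int), (-1 : Int)))
        = pvState x := by
      rw [if_pos]
      · rfl
      · show ((-1 : Int), (-1 : Int)).1 < ((x.2.length : Int))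
        simp only []
        omega
    rw [hfirst, pv_foldA]
    have hnil : PySem.List.insertBy pvBefore x [] = [x] := rfl
    rw [hnil]
    have hhead := pv_head_foldl_insertBy pvBefore rest [x] x rfl
    cases e : rest.foldl (fun acc y => PySem.List.insertBy pvBefore y acc) [x] with
    | nil => rw [e] at hhead; simp at hhead
    | cons h t =>
      rw [e] at hhead
      simp only [List.head?, Option.some.injEq] at hhead
      rw [← hhead]
      rfl
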